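-- pv_equiv track=rewrite | github.com/grenmarket/algo | problems/OI/pal.py | _min_palindrome
-- ===== SOURCE A (Python) =====
-- def _min_palindrome(word):
--     forward = ''
--     backwards = ''
--     indexes_of_palindromes = []
--     for i in range(2, len(word)+1, 2):
--         slice = word[i-2:i]
--         forward += slice
--         backwards = slice[::-1] + backwards
--         if forward == backwards:
--             forward = ''
--             backwards = ''
--             indexes_of_palindromes.append(i)
--     return indexes_of_palindromes
-- ===== SOURCE B (Python) =====
-- def _is_pal(word, lo, hi):
--     while lo < hi:
--         if word[lo] != word[hi]:
--             return False
--         lo += 1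
--         hi -= 1
--     return True
--
--
-- def _min_palindrome(word):
--     indexes_of_palindromes = []
--     start = 0
--     for i in range(2, len(word) + 1, 2):
--         if _is_pal(word, start, i - 1):
--             indexes_of_palindromes.append(i)
--             start = i
--     return indexes_of_palindromes
-- ===== Notes on version B (the rewrite author's own statement) =====
-- stated objective: faster
-- what changed: A maintains two growing accumulator strings (forward and reversed) via repeated concatenation and compares whole prefixes each step; B keeps only the start index of the current block and checks it with an early-exit two-pointer character comparison, building no strings.
import Mathlib
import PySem

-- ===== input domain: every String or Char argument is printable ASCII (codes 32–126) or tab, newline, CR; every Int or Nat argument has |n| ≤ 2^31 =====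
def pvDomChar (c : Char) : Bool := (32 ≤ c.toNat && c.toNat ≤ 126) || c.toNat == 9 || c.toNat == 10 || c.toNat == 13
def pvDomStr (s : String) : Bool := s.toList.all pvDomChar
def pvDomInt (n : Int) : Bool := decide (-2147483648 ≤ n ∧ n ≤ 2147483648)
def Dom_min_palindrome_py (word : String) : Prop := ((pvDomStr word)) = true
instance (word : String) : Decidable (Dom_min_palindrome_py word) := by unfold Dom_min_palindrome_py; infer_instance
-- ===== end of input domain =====

-- B replaces A's two growing accumulator strings (repeated concatenation and whole-prefix
-- comparison) by a two-pointer palindrome check of the current block; same return value.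

-- ===== PORT A =====
-- loop state: (forward, backwards, indexes_of_palindromes)
def minPalStepA (w : List Char) (st : List Char × List Char × List Int) (i : Int) :
    List Char × List Char × List Int :=
  let sl := PySem.List.slice w (some (i - 2)) (some i)
  let forward := st.1 ++ sl
  let backwards := sl.reverse ++ st.2.1
  if forward = backwards then ([], [], st.2.2 ++ [i])
  else (forward, backwards, st.2.2)

def min_palindrome_py (word : String) : List Int :=
  ((PySem.List.pyRange 2 ((word.toList.length : Int) + 1) 2).foldl
      (minPalStepA word.toList) ([], [], [])).2.2

-- ===== PORT B =====
-- the while loop of _is_pal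
def isPalB (w : List Char) (lo hi : Int) : Bool :=
  if lo < hi then
    if PySem.List.pyGet? w lo = PySem.List.pyGet? w hi then isPalB w (lo + 1) (hi - 1)
    else false
  else true
termination_by (hi - lo).toNat
decreasing_by omega

-- loop state: (start, indexes_of_palindromes)
def minPalStepB (w : List Char) (st : Int × List Int) (i : Int) : Int × List Int :=
  if isPalB w st.1 (i - 1) then (i, st.2 ++ [i]) else st

def min_palindrome_py_alt (word : String) : List Int :=
  ((PySem.List.pyRange 2 ((word.toList.length : Int) + 1) 2).foldl
      (minPalStepB word.toList) (0, [])).2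

-- ===== PRECONDITION & SPEC =====
def Spec_min_palindrome_py (word : String) (out : List Int) : Prop := out = min_palindrome_py_alt word
instance (word : String) (out : List Int) : Decidable (Spec_min_palindrome_py word out) := by unfold Spec_min_palindrome_py; infer_instance

-- ===== CLAIM (what is proved, stated in full; the proofs are below) =====
def Claim_equal_min_palindrome_py : Prop := ∀ (word : String), Dom_min_palindrome_py word → Spec_min_palindrome_py word (min_palindrome_py word)

-- ===== LEMMAS AND PROOFS =====

-- the contiguous segment w[a:b] for Nat bounds
def seg (w : List Char) (a b : Nat) : List Char := (w.drop a).take (b - a)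

lemma seg_nil (w : List Char) (a b : Nat) (h : b ≤ a) : seg w a b = [] := by
  simp [seg, Nat.sub_eq_zero_of_le h]

lemma seg_cons (w : List Char) (a b : Nat) (h1 : a < b) (h2 : a < w.length) :
    seg w a b = w[a] :: seg w (a + 1) b := by
  unfold seg
  rw [List.drop_eq_getElem_cons h2]
  rw [show b - a = (b - (a + 1)) + 1 by omega, List.take_succ_cons]

lemma seg_snoc (w : List Char) (a b : Nat) (h1 : a < b) (h2 : b ≤ w.length) :
    seg w a b = seg w a (b - 1) ++ [w[b - 1]'(by omega)] := by
  unfold seg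
  rw [show b - a = (b - 1 - a) + 1 by omega, List.take_add_one]
  congr 1
  rw [List.getElem?_drop, show a + (b - 1 - a) = b - 1 by omega,
    List.getElem?_eq_getElem (by omega)]
  rfl

lemma seg_append (w : List Char) (a b c : Nat) (hab : a ≤ b) (hbc : b ≤ c) :
    seg w a c = seg w a b ++ seg w b c := by
  unfold seg
  rw [show c - a = (b - a) + (c - b) by omega, List.take_add, List.drop_drop,
    show a + (b - a) = b by omega]

lemma pal_cons_snoc (c d : Char) (M : List Char) :
    (c :: (M ++ [d]) = (c :: (M ++ [d])).reverse) ↔ (c = d ∧ M = M.reverse) := by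
  rw [show (c :: (M ++ [d])).reverse = d :: (M.reverse ++ [c]) by simp, List.cons_eq_cons]
  constructor
  · rintro ⟨rfl, h2⟩
    exact ⟨rfl, by simpa using h2⟩
  · rintro ⟨rfl, hM⟩
    exact ⟨rfl, by rw [← hM]⟩

lemma isPal_ge (w : List Char) (lo hi : Nat) (h : hi ≤ lo) (hhi : hi < w.length) :
    (isPalB w (↑lo) (↑hi) = true ↔ seg w lo (hi + 1) = (seg w lo (hi + 1)).reverse) := by
  rw [isPalB, if_neg (by omega : ¬ (lo : Int) < (hi : Int))]
  by_cases h2 : hi + 1 ≤ lo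
  · simp [seg_nil w lo (hi + 1) h2]
  · have : lo = hi := by omega
    subst this
    rw [seg_cons w lo (lo + 1) (by omega) hhi, seg_nil w (lo + 1) (lo + 1) le_rfl]
    simp

-- the while loop succeeds exactly when the block w[lo:hi+1] is a palindrome
lemma isPal_iff (w : List Char) : ∀ (d lo hi : Nat), hi - lo ≤ d → hi < w.length →
    (isPalB w (↑lo) (↑hi) = true ↔ seg w lo (hi + 1) = (seg w lo (hi + 1)).reverse) := by
  intro d
  induction d with
  | zero => intro lo hi hd hhi; exact isPal_ge w lo hi (by omega) hhi
  | succ d ih =>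
    intro lo hi hd hhi
    by_cases hlt : lo < hi
    · have hlo : lo < w.length := by omega
      rw [isPalB, if_pos (by exact_mod_cast hlt)]
      rw [PySem.List.pyGet?_natCast, PySem.List.pyGet?_natCast,
        List.getElem?_eq_getElem hlo, List.getElem?_eq_getElem hhi]
      have hcast1 : (lo : Int) + 1 = ((lo + 1 : Nat) : Int) := by push_cast; ring
      have hcast2 : (hi : Int) - 1 = ((hi - 1 : Nat) : Int) := by omega
      rw [hcast1, hcast2]
      have hih := ih (lo + 1) (hi - 1) (by omega) (by omega)
      rw [seg_cons w lo (hi + 1) (by omega) hlo,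
        seg_snoc w (lo + 1) (hi + 1) (by omega) (by omega)]
      simp only [Nat.add_sub_cancel]
      rw [pal_cons_snoc]
      have hseg : seg w (lo + 1) hi = seg w (lo + 1) (hi - 1 + 1) := by
        congr 1; omega
      by_cases hc : w[lo] = w[hi]
      · rw [if_pos (by rw [hc]), hih, ← hseg]
        simp [hc]
      · rw [if_neg (by simpa using hc)]
        simp [hc]
    · exact isPal_ge w lo hi (by omega) hhi

lemma pyRange_two_nil (a b : Int) (h : b ≤ a) : PySem.List.pyRange a b 2 = [] := by
  rw [PySem.List.pyRange_of_pos a b (by norm_num)]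
  simp [if_neg (not_lt.2 h)]

lemma pyRange_two_cons (a b : Int) (h : a < b) :
    PySem.List.pyRange a b 2 = a :: PySem.List.pyRange (a + 2) b 2 := by
  rw [PySem.List.pyRange_of_pos a b (by norm_num),
      PySem.List.pyRange_of_pos (a + 2) b (by norm_num), if_pos h]
  by_cases h2 : a + 2 < b
  · rw [if_pos h2,
      show ((b - a + 2 - 1) / 2).toNat = ((b - (a + 2) + 2 - 1) / 2).toNat + 1 by omega,
      List.range_succ_eq_map]
    simp only [List.map_cons, List.map_map, Int.ofNat_zero]
    refine List.cons_eq_cons.mpr ⟨by push_cast; ring, ?_⟩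
    apply List.map_congr_left
    intro k _
    simp only [Function.comp_apply, Nat.succ_eq_add_one]
    push_cast; ring
  · rw [if_neg h2, show ((b - a + 2 - 1) / 2).toNat = 1 by omega]
    simp

-- invariant: A's forward is w[start:i-2], backwards its reverse, and both result lists agree
lemma loop_eq (w : List Char) : ∀ (m i s : Nat) (R : List Int),
    w.length + 1 ≤ i + m → 2 ≤ i → s ≤ i - 2 → i - 2 ≤ w.length →
    ((PySem.List.pyRange (↑i) ((w.length : Int) + 1) 2).foldl (minPalStepA w)
        (seg w s (i - 2), (seg w s (i - 2)).reverse, R)).2.2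
      = ((PySem.List.pyRange (↑i) ((w.length : Int) + 1) 2).foldl (minPalStepB w)
        ((↑s : Int), R)).2 := by
  intro m
  induction m with
  | zero =>
    intro i s R hm hi hs hw
    rw [pyRange_two_nil _ _ (by omega)]
    rfl
  | succ m ih =>
    intro i s R hm hi hs hw
    by_cases hend : w.length + 1 ≤ i
    · rw [pyRange_two_nil _ _ (by omega)]
      rfl
    · have hin : i ≤ w.length := by omega
      rw [pyRange_two_cons _ _ (by omega)]
      simp only [List.foldl_cons]
      have hsl : PySem.List.slice w (some ((i : Int) - 2)) (some (i : Int)) = seg w (i - 2) i := by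
        rw [show ((i : Int) - 2) = ((i - 2 : Nat) : Int) by omega, PySem.List.slice_natCast]
        rfl
      have hfw : seg w s (i - 2) ++ seg w (i - 2) i = seg w s i :=
        (seg_append w s (i - 2) i hs (by omega)).symm
      have hbw : (seg w (i - 2) i).reverse ++ (seg w s (i - 2)).reverse = (seg w s i).reverse := by
        rw [← List.reverse_append, hfw]
      have hpal : isPalB w (↑s) ((i : Int) - 1) = true ↔
          seg w s i = (seg w s i).reverse := by
        rw [show ((i : Int) - 1) = ((i - 1 : Nat) : Int) by omega]
        have := isPal_iff w (i - 1 - s) s (i - 1) le_rfl (by omega)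
        rwa [show i - 1 + 1 = i by omega] at this
      have hstep : (i : Int) + 2 = ((i + 2 : Nat) : Int) := by push_cast; ring
      by_cases hp : seg w s i = (seg w s i).reverse
      · have stepA : minPalStepA w (seg w s (i - 2), (seg w s (i - 2)).reverse, R) (↑i)
            = ([], [], R ++ [(i : Int)]) := by
          simp only [minPalStepA, hsl, hfw, hbw]
          rw [if_pos hp]
        have stepB : minPalStepB w ((↑s : Int), R) (↑i) = ((i : Int), R ++ [(i : Int)]) := by
          simp only [minPalStepB]
          rw [if_pos (hpal.mpr hp)]
        rw [stepA, stepB, hstep]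
        have := ih (i + 2) i (R ++ [(i : Int)]) (by omega) (by omega) (by omega) (by omega)
        rwa [show (i + 2) - 2 = i by omega, seg_nil w i i le_rfl] at this
      · have stepA : minPalStepA w (seg w s (i - 2), (seg w s (i - 2)).reverse, R) (↑i)
            = (seg w s i, (seg w s i).reverse, R) := by
          simp only [minPalStepA, hsl, hfw, hbw]
          rw [if_neg hp]
        have stepB : minPalStepB w ((↑s : Int), R) (↑i) = ((↑s : Int), R) := by
          simp only [minPalStepB]
          rw [if_neg (by simpa [hpal] using hp)]
        rw [stepA, stepB, hstep]
        have := ih (i + 2) s R (by omega) (by omega) (by omega) (by omega)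
        rwa [show (i + 2) - 2 = i by omega] at this

-- ===== VERDICT (by name: the statement is the Claim_ definition above) =====
theorem min_palindrome_py_spec : Claim_equal_min_palindrome_py := by
  intro word _
  unfold Spec_min_palindrome_py min_palindrome_py min_palindrome_py_alt
  have h := loop_eq word.toList word.toList.length 2 0 [] (by omega) (by omega) (by omega) (by omega)
  simpa [seg_nil word.toList 0 0 le_rfl] using h
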